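-- pv_equiv track=rewrite | github.com/Dakota-Schramm/23-advent-of-code | day_one/part_one.py | determine_calibration_value
-- ===== SOURCE A (Python) =====
-- import string
--
-- digits = set(string.digits)
--
-- def determine_calibration_value(text):
--   n = len(text)
--   left, right = 0, n - 1
--   while text[left] not in digits:
--     left += 1
--
--   while text[right] not in digits:
--     right -= 1
--
--   return int(text[left] + text[right])
-- ===== SOURCE B (Python) =====
-- import string
--
-- digits = set(string.digits)
--
-- def determine_calibration_value(text):
--   ds = [c for c in text if c in digits]
--   return int(ds[0] + ds[-1])
-- ===== Notes on version B (the rewrite author's own statement) =====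
-- stated objective: simpler
-- what changed: Replaces the two inward-scanning while loops over indices by a single forward pass that collects all digit characters and uses the first and last of them.
import Mathlib
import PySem

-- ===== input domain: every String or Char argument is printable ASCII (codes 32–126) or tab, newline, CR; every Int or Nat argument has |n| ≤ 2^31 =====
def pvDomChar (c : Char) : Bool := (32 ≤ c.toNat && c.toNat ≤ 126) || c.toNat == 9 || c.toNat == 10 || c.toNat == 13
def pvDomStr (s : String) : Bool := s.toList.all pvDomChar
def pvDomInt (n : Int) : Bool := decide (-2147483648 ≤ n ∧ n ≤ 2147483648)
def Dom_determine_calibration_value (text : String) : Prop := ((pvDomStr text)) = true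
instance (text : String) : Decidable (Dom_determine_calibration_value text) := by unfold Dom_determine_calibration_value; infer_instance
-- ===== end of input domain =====

-- B replaces A's two inward-scanning index loops by one forward pass collecting all
-- digit characters and indexing its first/last element (objective: simpler).

-- ===== PORT A =====
-- 'text[left] not in digits; left += 1' : scan forward from index 0 until a digit
def pvScanLeft (cs : List Char) : Option Char :=
  match cs with
  | [] => none
  | c :: rest => if c.isDigit then some c else pvScanLeft rest

-- 'text[right] not in digits; right -= 1' : scan backward from the last index until a digit
def pvScanRight (cs : List Char) : Option Char :=
  match cs with
  | [] => none
  | c :: rest =>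
    match pvScanRight rest with
    | some d => some d
    | none => if c.isDigit then some c else none

def determine_calibration_value (text : String) : Int :=
  match pvScanLeft text.toList, pvScanRight text.toList with
  | some a, some b => (PySem.Int.ofStr? (String.ofList [a, b])).getD 0
  | _, _ => 0  -- unreachable under Pre_ (Python raises IndexError)

-- ===== PORT B =====
def determine_calibration_value_alt (text : String) : Int :=
  let ds := text.toList.filter (fun c => c.isDigit)
  match PySem.List.pyGet? ds 0 with
  | none => 0  -- unreachable under Pre_ (Python's ds[0] raises IndexError)
  | some a =>
    match PySem.List.pyGet? ds (-1) with
    | none => 0  -- unreachable under Pre_ (Python's ds[-1] raises IndexError)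
    | some b => (PySem.Int.ofStr? (String.ofList [a, b])).getD 0

-- ===== PRECONDITION & SPEC =====
-- Pre_ excludes texts with no digit character, on which both A and B raise IndexError.
def Pre_determine_calibration_value (text : String) : Prop :=
  text.toList.any (fun c => c.isDigit) = true
instance (text : String) : Decidable (Pre_determine_calibration_value text) := by
  unfold Pre_determine_calibration_value; infer_instance

def pvWitness_determine_calibration_value : String := "1"

def Spec_determine_calibration_value (text : String) (out : Int) : Prop := out = determine_calibration_value_alt text
instance (text : String) (out : Int) : Decidable (Spec_determine_calibration_value text out) := by unfold Spec_determine_calibration_value; infer_instance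

-- ===== CLAIM (what is proved, stated in full; the proofs are below) =====
def Claim_equal_determine_calibration_value : Prop := ∀ (text : String), Dom_determine_calibration_value text → Pre_determine_calibration_value text → Spec_determine_calibration_value text (determine_calibration_value text)

-- ===== LEMMAS AND PROOFS =====

theorem pvScanLeft_eq_head? (cs : List Char) :
    pvScanLeft cs = (cs.filter (fun c => c.isDigit)).head? := by
  induction cs with
  | nil => rfl
  | cons c rest ih =>
    simp only [pvScanLeft, List.filter_cons]
    by_cases h : c.isDigit <;> simp [h, ih]

theorem pvScanRight_eq_getLast? (cs : List Char) :
    pvScanRight cs = (cs.filter (fun c => c.isDigit)).getLast? := by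
  induction cs with
  | nil => rfl
  | cons c rest ih =>
    unfold pvScanRight
    rw [ih, List.filter_cons]
    rcases hr : (rest.filter (fun c => c.isDigit)).getLast? with _ | d
    · have hnil : rest.filter (fun c => c.isDigit) = [] := by simpa using hr
      by_cases h : c.isDigit <;> simp [h, hnil]
    · have hne : rest.filter (fun c => c.isDigit) ≠ [] := by intro h; simp [h] at hr
      obtain ⟨x, xs, hxx⟩ : ∃ x xs, rest.filter (fun c => c.isDigit) = x :: xs := by
        rcases hh : rest.filter (fun c => c.isDigit) with _ | ⟨x, xs⟩
        · exact absurd hh hne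
        · exact ⟨x, xs, hh⟩
      rw [hxx] at hr
      by_cases h : c.isDigit = true
      · simp only [hxx, hr, h, if_true, List.getLast?_cons_cons]
      · simp only [hxx, hr, h, if_false, Bool.false_eq_true]

-- ===== VERDICT (by name: the statement is the Claim_ definition above) =====
theorem determine_calibration_value_spec : Claim_equal_determine_calibration_value := by
  intro text _ hpre
  unfold Spec_determine_calibration_value determine_calibration_value determine_calibration_value_alt
  obtain ⟨c, hc, hd⟩ := List.any_eq_true.mp hpre
  have hne : text.toList.filter (fun c => c.isDigit) ≠ [] := by
    simp only [ne_eq, List.filter_eq_nil_iff, not_forall]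
    exact ⟨c, hc, by simp [hd]⟩
  obtain ⟨a, ha⟩ : ∃ a, (text.toList.filter (fun c => c.isDigit))[0]? = some a := by
    rcases hh : text.toList.filter (fun c => c.isDigit) with _ | ⟨x, xs⟩
    · exact absurd hh hne
    · exact ⟨x, by rw [hh]; rfl⟩
  obtain ⟨b, hb⟩ : ∃ b, (text.toList.filter (fun c => c.isDigit)).getLast? = some b :=
    ⟨_, List.getLast?_eq_some_getLast hne⟩
  simp only [pvScanLeft_eq_head?, pvScanRight_eq_getLast?, PySem.List.pyGet?_zero,
    PySem.List.pyGet?_neg_one, List.head?_eq_getElem?, ha, hb]
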